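-- pv_equiv track=rewrite | github.com/KINOX0924/Programmers_codingtest | 프로그래머스/0/181854. 배열의 길이에 따라 다른 연산하기/배열의 길이에 따라 다른 연산하기.py | solution
-- ===== SOURCE A (Python) =====
-- def solution(arr, n):
--     if len(arr) % 2 == 0 :
--         for index in range(0,len(arr)) :
--             if index % 2 == 1 :
--                 arr[index] += n
--     elif len(arr) % 2 == 1 :
--         for index in range(0,len(arr)) :
--             if index % 2 == 0 :
--                 arr[index] += n
--
--     return arr
-- ===== SOURCE B (Python) =====
-- def solution(arr, n):
--     # Walk the list from the END with a toggling flag: the last element always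
--     # gets +n, then every second one going backwards. No length-parity branch
--     # and no index-parity test are needed. Mutates arr in place like A.
--     out = []
--     add = True
--     for x in reversed(arr):
--         out.append(x + n if add else x)
--         add = not add
--     out.reverse()
--     arr[:] = out
--     return arr
-- ===== Notes on version B (the rewrite author's own statement) =====
-- stated objective: alternative
-- what changed: Replaces A's length-parity branch with two index-filtered scans by a single backward traversal with a toggling boolean flag (the last element is always bumped, then every second one going backwards), building a fresh list that is reversed back; no parity arithmetic on the length or the indices remains.
import Mathlib
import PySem

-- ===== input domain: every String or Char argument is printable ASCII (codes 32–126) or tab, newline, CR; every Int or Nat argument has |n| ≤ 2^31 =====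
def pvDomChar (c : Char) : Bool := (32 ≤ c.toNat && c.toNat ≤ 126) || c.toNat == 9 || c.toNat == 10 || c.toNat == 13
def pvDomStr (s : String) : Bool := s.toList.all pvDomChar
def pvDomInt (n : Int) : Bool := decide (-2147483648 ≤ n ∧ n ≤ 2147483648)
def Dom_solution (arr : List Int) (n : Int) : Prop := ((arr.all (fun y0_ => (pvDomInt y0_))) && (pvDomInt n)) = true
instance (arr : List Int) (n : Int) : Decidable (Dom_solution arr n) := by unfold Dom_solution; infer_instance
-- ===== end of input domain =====

-- B drops A's length-parity branch and index-parity filters: it walks the list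
-- backwards with a toggling flag (the last element always gets +n) and reverses
-- the built list back (alternative decomposition); both Pythons mutate arr in
-- place, the equivalence proved here is about the return value.

-- ===== PORT A =====
def solution (arr : List Int) (n : Int) : List Int :=
  if PySem.Int.mod (arr.length : Int) 2 == 0 then
    (PySem.List.pyRange 0 (arr.length : Int) 1).foldl
      (fun a index =>
        if PySem.Int.mod index 2 == 1 then
          PySem.List.pySetD a index (PySem.List.pyGetD a index 0 + n)
        else a) arr
  else if PySem.Int.mod (arr.length : Int) 2 == 1 then
    (PySem.List.pyRange 0 (arr.length : Int) 1).foldl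
      (fun a index =>
        if PySem.Int.mod index 2 == 0 then
          PySem.List.pySetD a index (PySem.List.pyGetD a index 0 + n)
        else a) arr
  else arr

-- ===== PORT B =====
-- the loop: out/add accumulator over reversed(arr); out.append → ++ [·]; then out.reverse()
def solution_alt (arr : List Int) (n : Int) : List Int :=
  (arr.reverse.foldl
    (fun (st : List Int × Bool) x =>
      (st.1 ++ [if st.2 then x + n else x], !st.2)) ([], true)).1.reverse

-- ===== PRECONDITION & SPEC =====
def Spec_solution (arr : List Int) (n : Int) (out : List Int) : Prop := out = solution_alt arr n
instance (arr : List Int) (n : Int) (out : List Int) : Decidable (Spec_solution arr n out) := by unfold Spec_solution; infer_instance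

-- ===== CLAIM (what is proved, stated in full; the proofs are below) =====
def Claim_equal_solution : Prop := ∀ (arr : List Int) (n : Int), Dom_solution arr n → Spec_solution arr n (solution arr n)

-- ===== LEMMAS AND PROOFS =====

-- A's loop body (parametrised by the parity p tested in the branch)
def stepA (n p : Int) (a : List Int) (index : Int) : List Int :=
  if PySem.Int.mod index 2 == p then
    PySem.List.pySetD a index (PySem.List.pyGetD a index 0 + n)
  else a

-- B's loop body
def stepB (n : Int) (st : List Int × Bool) (x : Int) : List Int × Bool :=
  (st.1 ++ [if st.2 then x + n else x], !st.2)

theorem foldl_stepA (n p : Int) :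
    ∀ (k : Nat) (a : List Int),
      (PySem.List.pyRange (k : Int) (a.length : Int) 1).foldl (stepA n p) a
      = a.mapIdx (fun i x => if k ≤ i ∧ ((i : Int) % 2 = p) then x + n else x) := by
  intro k a
  by_cases hk : k < a.length
  case neg =>
    rw [show PySem.List.pyRange (k : Int) (a.length : Int) 1 = [] by
      simp [PySem.List.pyRange_of_pos _ _ (by norm_num : (0:Int) < 1)]; omega]
    rw [List.foldl_nil]
    apply List.ext_getElem (by simp)
    intro i h1 h2
    simp only [List.getElem_mapIdx]
    have : ¬ (k ≤ i ∧ ((i : Int) % 2 = p)) := by simp at h2; omega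
    rw [if_neg this]
  case pos =>
    have hterm : a.length - (k+1) < a.length - k := by omega
    rw [PySem.List.pyRange_one_cons (by exact_mod_cast hk), List.foldl_cons,
        show ((k : Int) + 1) = ((k+1 : Nat) : Int) by push_cast; ring]
    have hlen : (stepA n p a (k : Int)).length = a.length := by
      unfold stepA; split <;> simp
    have ih := foldl_stepA n p (k+1) (stepA n p a (k : Int))
    rw [hlen] at ih
    rw [ih]
    apply List.ext_getElem (by simp [hlen])
    intro i h1 h2
    simp only [List.getElem_mapIdx]
    have hlen2 : i < a.length := by simpa using h2
    have hmodk : PySem.Int.mod (k : Int) 2 = ((k % 2 : Nat) : Int) :=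
      PySem.Int.mod_natCast k 2
    by_cases hp : ((k : Int) % 2 = p)
    · have hb : (PySem.Int.mod (k : Int) 2 == p) = true := by
        rw [hmodk]; simp; omega
      have hset : stepA n p a (k : Int) = a.set k (a.getD k 0 + n) := by
        unfold stepA
        rw [if_pos hb]
        simp [PySem.List.pySetD_natCast, PySem.List.pyGetD_natCast]
      simp only [hset]
      by_cases hik : i = k
      · subst hik
        have hno : ¬ (i + 1 ≤ i ∧ ((i : Int) % 2 = p)) := by omega
        rw [if_neg hno, if_pos ⟨le_refl i, hp⟩,
            List.getElem_set_self, List.getD_eq_getElem?_getD,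
            List.getElem?_eq_getElem hlen2]
        rfl
      · rw [List.getElem_set_ne (by omega)]
        have hiff : (k + 1 ≤ i ∧ ((i : Int) % 2 = p)) ↔ (k ≤ i ∧ ((i : Int) % 2 = p)) := by
          constructor
          · rintro ⟨h1', h2'⟩; exact ⟨by omega, h2'⟩
          · rintro ⟨h1', h2'⟩
            refine ⟨by omega, h2'⟩
        by_cases hc : k + 1 ≤ i ∧ ((i : Int) % 2 = p)
        · rw [if_pos hc, if_pos (hiff.mp hc)]
        · rw [if_neg hc, if_neg (fun h => hc (hiff.mpr h))]
    · have hb : (PySem.Int.mod (k : Int) 2 == p) = false := by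
        rw [hmodk]; simp; omega
      have hset : stepA n p a (k : Int) = a := by
        unfold stepA; rw [hb]; simp
      simp only [hset]
      have hiff : (k + 1 ≤ i ∧ ((i : Int) % 2 = p)) ↔ (k ≤ i ∧ ((i : Int) % 2 = p)) := by
        constructor
        · rintro ⟨h1', h2'⟩; exact ⟨by omega, h2'⟩
        · rintro ⟨h1', h2'⟩
          have : i ≠ k := by intro he; apply hp; rw [← he]; exact h2'
          exact ⟨by omega, h2'⟩
      by_cases hc : k + 1 ≤ i ∧ ((i : Int) % 2 = p)
      · rw [if_pos hc, if_pos (hiff.mp hc)]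
      · rw [if_neg hc, if_neg (fun h => hc (hiff.mpr h))]
termination_by k a => a.length - k

-- the flag at relative index i of the remaining traversal
theorem foldl_stepB (n : Int) :
    ∀ (xs out : List Int) (add : Bool),
      (xs.foldl (stepB n) (out, add)).1
      = out ++ xs.mapIdx (fun i x => if (decide (i % 2 = 0)) == add then x + n else x) := by
  intro xs
  induction xs with
  | nil => intro out add; simp
  | cons x xs ih =>
    intro out add
    rw [List.foldl_cons]
    show ((xs.foldl (stepB n) (out ++ [if add then x + n else x], !add)).1) = _
    rw [ih]
    rw [List.mapIdx_cons]
    have h0 : (decide (0 % 2 = 0) == add) = add := by cases add <;> decide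
    have hshift :
        xs.mapIdx (fun i a => if (decide ((i+1) % 2 = 0)) == add then a + n else a)
        = xs.mapIdx (fun i a => if (decide (i % 2 = 0)) == !add then a + n else a) := by
      apply List.ext_getElem (by simp)
      intro i hi1 hi2
      simp only [List.getElem_mapIdx]
      by_cases h : i % 2 = 0
      · have h1 : (i+1) % 2 ≠ 0 := by omega
        cases add <;> simp [h, h1]
      · have h1 : (i+1) % 2 = 0 := by omega
        cases add <;> simp [h, h1]
    rw [show (fun (i : Nat) (a : Int) => if (decide ((i+1) % 2 = 0)) == add then a + n else a)
          = (fun i => (fun (i : Nat) (x : Int) => if (decide (i % 2 = 0)) == add then x + n else x) (i+1))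
        from rfl] at hshift
    rw [hshift, h0]
    simp

-- ===== VERDICT (by name: the statement is the Claim_ definition above) =====
theorem solution_spec : Claim_equal_solution := by
  intro arr n _
  unfold Spec_solution solution solution_alt
  have hmodL : PySem.Int.mod (arr.length : Int) 2 = ((arr.length % 2 : Nat) : Int) :=
    PySem.Int.mod_natCast arr.length 2
  have hB := foldl_stepB n arr.reverse [] true
  rw [show (fun (st : List Int × Bool) x =>
        (st.1 ++ [if st.2 then x + n else x], !st.2)) = stepB n from rfl]
  rw [hB]
  simp only [List.nil_append]
  by_cases he : arr.length % 2 = 0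
  · have h0 : (PySem.Int.mod (arr.length : Int) 2 == 0) = true := by
      rw [hmodL, he]; decide
    rw [if_pos h0]
    have hA := foldl_stepA n 1 0 arr
    rw [Nat.cast_zero] at hA
    rw [show (PySem.List.pyRange 0 (arr.length : Int) 1).foldl
          (fun a index => if PySem.Int.mod index 2 == 1 then
            PySem.List.pySetD a index (PySem.List.pyGetD a index 0 + n) else a) arr
        = (PySem.List.pyRange 0 (arr.length : Int) 1).foldl (stepA n 1) arr from rfl, hA]
    apply List.ext_getElem (by simp)
    intro i h1 h2
    have hi : i < arr.length := by simpa using h1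
    rw [List.getElem_mapIdx, List.getElem_reverse, List.getElem_mapIdx,
        List.getElem_reverse]
    simp only [List.length_mapIdx, List.length_reverse]
    by_cases hc : 0 ≤ i ∧ ((i : Int) % 2 = 1)
    · rw [if_pos hc]
      have : ((arr.length - 1 - i) % 2 = 0) := by omega
      simp [this]
      congr 1
      omega
    · rw [if_neg hc]
      have : ¬ ((arr.length - 1 - i) % 2 = 0) := by omega
      simp [this]
      congr 1
      omega
  · have ho : arr.length % 2 = 1 := by omega
    have h0 : (PySem.Int.mod (arr.length : Int) 2 == 0) = false := by
      rw [hmodL, ho]; decide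
    rw [if_neg (by rw [h0]; exact Bool.false_ne_true)]
    have h1b : (PySem.Int.mod (arr.length : Int) 2 == 1) = true := by
      rw [hmodL, ho]; decide
    rw [if_pos h1b]
    have hA := foldl_stepA n 0 0 arr
    rw [Nat.cast_zero] at hA
    rw [show (PySem.List.pyRange 0 (arr.length : Int) 1).foldl
          (fun a index => if PySem.Int.mod index 2 == 0 then
            PySem.List.pySetD a index (PySem.List.pyGetD a index 0 + n) else a) arr
        = (PySem.List.pyRange 0 (arr.length : Int) 1).foldl (stepA n 0) arr from rfl, hA]
    apply List.ext_getElem (by simp)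
    intro i h1 h2
    have hi : i < arr.length := by simpa using h1
    rw [List.getElem_mapIdx, List.getElem_reverse, List.getElem_mapIdx,
        List.getElem_reverse]
    simp only [List.length_mapIdx, List.length_reverse]
    by_cases hc : 0 ≤ i ∧ ((i : Int) % 2 = 0)
    · rw [if_pos hc]
      have : ((arr.length - 1 - i) % 2 = 0) := by omega
      simp [this]
      congr 1
      omega
    · rw [if_neg hc]
      have : ¬ ((arr.length - 1 - i) % 2 = 0) := by omega
      simp [this]
      congr 1
      omega
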